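-- pv_equiv track=rewrite | github.com/alex-p-pigeon/tg-story-bot | handlers/learnpath/handlers/story_helpers.py | get_action_verb_for_item
-- ===== SOURCE A (Python) =====
-- def get_action_verb_for_item(item_name: str, item_purpose: str, npc_name: str = None) -> str:
--     """
--     Определить глагол действия в зависимости от назначения item
--
--     Args:
--         item_name: Название item
--         item_purpose: Назначение item (из c_purpose)
--         npc_name: Имя NPC (опционально)
--
--     Returns:
--         Строка с действием (без "You")
--
--     Examples:
--         "attacked Zombie with Kitchen knife"
--         "showed Passport to Officer"
--         "used Bandage on Injured person"
--     """
--
--     purpose_lower = item_purpose.lower() if item_purpose else ""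
--
--     # ⚔️ WEAPON - атаковать
--     if any(keyword in purpose_lower for keyword in ['weapon', 'attack', 'fight', 'combat', 'defense']):
--         return f"attacked {npc_name} with {item_name}"
--
--     # 🩹 MEDICAL - использовать на
--     elif any(keyword in purpose_lower for keyword in ['medical', 'heal', 'bandage', 'medicine', 'first aid']):
--         return f"used {item_name} on {npc_name}"
--
--     # 🍞 FOOD - предложить
--     elif any(keyword in purpose_lower for keyword in ['food', 'drink', 'eat', 'consume', 'nutrition']):
--         return f"offered {item_name} to {npc_name}"
--
--     # 📋 DOCUMENT - показать
--     elif any(keyword in purpose_lower for keyword in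
--              ['document', 'paper', 'id', 'passport', 'certificate', 'proof', 'show']):
--         return f"showed {item_name} to {npc_name}"
--
--     # 🔑 KEY - использовать
--     elif any(keyword in purpose_lower for keyword in ['key', 'unlock', 'open']):
--         return f"used {item_name} near {npc_name}"
--
--     # 🧪 TOOL - применить
--     elif any(keyword in purpose_lower for keyword in ['tool', 'repair', 'fix']):
--         return f"applied {item_name} to {npc_name}"  # ⬅️ Вот где "apply" уместен!
--
--     # 💰 MONEY - предложить
--     elif any(keyword in purpose_lower for keyword in ['money', 'bribe', 'payment', 'currency']):
--         return f"offered {item_name} to {npc_name}"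
--
--     # 🎁 DEFAULT - показать (универсальный fallback)
--     else:
--         return f"showed {item_name} to {npc_name}"
-- ===== SOURCE B (Python) =====
-- _KEYWORD_PRIORITY = {
--     'weapon': 0, 'attack': 0, 'fight': 0, 'combat': 0, 'defense': 0,
--     'medical': 1, 'heal': 1, 'bandage': 1, 'medicine': 1, 'first aid': 1,
--     'food': 2, 'drink': 2, 'eat': 2, 'consume': 2, 'nutrition': 2,
--     'document': 3, 'paper': 3, 'id': 3, 'passport': 3, 'certificate': 3,
--     'proof': 3, 'show': 3,
--     'key': 4, 'unlock': 4, 'open': 4,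
--     'tool': 5, 'repair': 5, 'fix': 5,
--     'money': 6, 'bribe': 6, 'payment': 6, 'currency': 6,
-- }
--
-- _TEMPLATES = (
--     "attacked {npc} with {item}",
--     "used {item} on {npc}",
--     "offered {item} to {npc}",
--     "showed {item} to {npc}",
--     "used {item} near {npc}",
--     "applied {item} to {npc}",
--     "offered {item} to {npc}",
--     "showed {item} to {npc}",   # default
-- )
--
--
-- def get_action_verb_for_item(item_name: str, item_purpose: str, npc_name: str = None) -> str:
--     purpose_lower = item_purpose.lower() if item_purpose else ""
--     idx = min((prio for kw, prio in _KEYWORD_PRIORITY.items() if kw in purpose_lower),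
--               default=len(_TEMPLATES) - 1)
--     return _TEMPLATES[idx].format(item=item_name, npc=npc_name)
-- ===== Notes on version B (the rewrite author's own statement) =====
-- stated objective: alternative
-- what changed: Instead of an ordered first-match if/elif chain over per-category keyword groups, B flattens all keywords into one keyword->priority dict, aggregates the minimum priority over every matching keyword (default = last index), and indexes a template tuple with the result.
import Mathlib
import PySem

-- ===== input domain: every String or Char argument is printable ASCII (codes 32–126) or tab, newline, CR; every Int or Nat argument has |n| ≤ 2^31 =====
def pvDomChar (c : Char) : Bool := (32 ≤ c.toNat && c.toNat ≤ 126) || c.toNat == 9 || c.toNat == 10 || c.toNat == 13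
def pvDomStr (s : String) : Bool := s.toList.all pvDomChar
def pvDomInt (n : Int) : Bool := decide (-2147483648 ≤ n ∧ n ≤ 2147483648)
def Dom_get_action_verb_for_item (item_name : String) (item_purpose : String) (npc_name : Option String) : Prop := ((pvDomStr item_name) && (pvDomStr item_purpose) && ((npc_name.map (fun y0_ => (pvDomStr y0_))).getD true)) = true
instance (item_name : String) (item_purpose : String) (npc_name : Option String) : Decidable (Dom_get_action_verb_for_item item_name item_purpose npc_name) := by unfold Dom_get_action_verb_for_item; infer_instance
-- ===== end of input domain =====

-- B replaces A's ordered if/elif chain by a min-aggregation over a flat keyword->priority dict plus a template table (alternative decomposition; same cost). Equivalence proved on Dom.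


-- ===== PORT A =====
-- f-string interpolation of npc_name: Python prints None as "None"
def pvNpcStr (npc : Option String) : String := npc.getD "None"

-- literal port of A's if/elif chain
def get_action_verb_for_item (item_name : String) (item_purpose : String) (npc_name : Option String) : String :=
  let purpose_lower := if item_purpose == "" then "" else PySem.Str.lower item_purpose
  if ["weapon", "attack", "fight", "combat", "defense"].any (fun k => PySem.Str.isIn k purpose_lower) then
    "attacked " ++ pvNpcStr npc_name ++ " with " ++ item_name
  else if ["medical", "heal", "bandage", "medicine", "first aid"].any (fun k => PySem.Str.isIn k purpose_lower) then
    "used " ++ item_name ++ " on " ++ pvNpcStr npc_name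
  else if ["food", "drink", "eat", "consume", "nutrition"].any (fun k => PySem.Str.isIn k purpose_lower) then
    "offered " ++ item_name ++ " to " ++ pvNpcStr npc_name
  else if ["document", "paper", "id", "passport", "certificate", "proof", "show"].any (fun k => PySem.Str.isIn k purpose_lower) then
    "showed " ++ item_name ++ " to " ++ pvNpcStr npc_name
  else if ["key", "unlock", "open"].any (fun k => PySem.Str.isIn k purpose_lower) then
    "used " ++ item_name ++ " near " ++ pvNpcStr npc_name
  else if ["tool", "repair", "fix"].any (fun k => PySem.Str.isIn k purpose_lower) then
    "applied " ++ item_name ++ " to " ++ pvNpcStr npc_name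
  else if ["money", "bribe", "payment", "currency"].any (fun k => PySem.Str.isIn k purpose_lower) then
    "offered " ++ item_name ++ " to " ++ pvNpcStr npc_name
  else
    "showed " ++ item_name ++ " to " ++ pvNpcStr npc_name

-- ===== PORT B =====
-- port of _KEYWORD_PRIORITY (flat dict, insertion order)
def pvKeywordPriority : List (String × Nat) :=
  [("weapon", 0), ("attack", 0), ("fight", 0), ("combat", 0), ("defense", 0),
   ("medical", 1), ("heal", 1), ("bandage", 1), ("medicine", 1), ("first aid", 1),
   ("food", 2), ("drink", 2), ("eat", 2), ("consume", 2), ("nutrition", 2),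
   ("document", 3), ("paper", 3), ("id", 3), ("passport", 3), ("certificate", 3),
   ("proof", 3), ("show", 3),
   ("key", 4), ("unlock", 4), ("open", 4),
   ("tool", 5), ("repair", 5), ("fix", 5),
   ("money", 6), ("bribe", 6), ("payment", 6), ("currency", 6)]

-- port of _TEMPLATES: template i applied to (item, npc)
def pvTemplates : List (String → String → String) :=
  [fun item npc => "attacked " ++ npc ++ " with " ++ item,
   fun item npc => "used " ++ item ++ " on " ++ npc,
   fun item npc => "offered " ++ item ++ " to " ++ npc,
   fun item npc => "showed " ++ item ++ " to " ++ npc,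
   fun item npc => "used " ++ item ++ " near " ++ npc,
   fun item npc => "applied " ++ item ++ " to " ++ npc,
   fun item npc => "offered " ++ item ++ " to " ++ npc,
   fun item npc => "showed " ++ item ++ " to " ++ npc]

-- min over matched keyword priorities (default = last template), then index the table
def get_action_verb_for_item_alt (item_name : String) (item_purpose : String) (npc_name : Option String) : String :=
  let purpose_lower := if item_purpose == "" then "" else PySem.Str.lower item_purpose
  let idx := pvKeywordPriority.foldl
    (fun acc kp => if PySem.Str.isIn kp.1 purpose_lower then min acc kp.2 else acc)
    (pvTemplates.length - 1)
  (pvTemplates.getD idx (fun _ _ => "")) item_name (pvNpcStr npc_name)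

-- ===== PRECONDITION & SPEC =====
def Spec_get_action_verb_for_item (item_name : String) (item_purpose : String) (npc_name : Option String) (out : String) : Prop := out = get_action_verb_for_item_alt item_name item_purpose npc_name
instance (item_name : String) (item_purpose : String) (npc_name : Option String) (out : String) : Decidable (Spec_get_action_verb_for_item item_name item_purpose npc_name out) := by unfold Spec_get_action_verb_for_item; infer_instance

-- ===== CLAIM (what is proved, stated in full; the proofs are below) =====
def Claim_equal_get_action_verb_for_item : Prop := ∀ (item_name : String) (item_purpose : String) (npc_name : Option String), Dom_get_action_verb_for_item item_name item_purpose npc_name → Spec_get_action_verb_for_item item_name item_purpose npc_name (get_action_verb_for_item item_name item_purpose npc_name)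

-- ===== LEMMAS AND PROOFS =====

-- folding min over a constant-priority segment equals one conditional min on the segment's any()
theorem pvFoldSeg (p : String → Bool) (ks : List String) (c acc : Nat) :
    List.foldl (fun a (kp : String × Nat) => if p kp.1 then min a kp.2 else a) acc
      (ks.map (fun k => (k, c)))
    = if ks.any p then min acc c else acc := by
  induction ks generalizing acc with
  | nil => simp
  | cons k ks ih =>
    simp only [List.map, List.foldl, List.any_cons]
    by_cases h : p k = true
    · simp [h, ih]
    · simp [h, ih]
theorem pvIdxEq (p : String → Bool) :
    pvKeywordPriority.foldl (fun acc kp => if p kp.1 then min acc kp.2 else acc) 7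
    = if ["weapon", "attack", "fight", "combat", "defense"].any p then 0
      else if ["medical", "heal", "bandage", "medicine", "first aid"].any p then 1
      else if ["food", "drink", "eat", "consume", "nutrition"].any p then 2
      else if ["document", "paper", "id", "passport", "certificate", "proof", "show"].any p then 3
      else if ["key", "unlock", "open"].any p then 4
      else if ["tool", "repair", "fix"].any p then 5
      else if ["money", "bribe", "payment", "currency"].any p then 6
      else 7 := by
  have hsplit : pvKeywordPriority =
      (["weapon", "attack", "fight", "combat", "defense"].map (fun k => (k, 0)))
      ++ ((["medical", "heal", "bandage", "medicine", "first aid"].map (fun k => (k, 1)))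
      ++ ((["food", "drink", "eat", "consume", "nutrition"].map (fun k => (k, 2)))
      ++ ((["document", "paper", "id", "passport", "certificate", "proof", "show"].map (fun k => (k, 3)))
      ++ ((["key", "unlock", "open"].map (fun k => (k, 4)))
      ++ ((["tool", "repair", "fix"].map (fun k => (k, 5)))
      ++ (["money", "bribe", "payment", "currency"].map (fun k => (k, 6)))))))) := by
    simp [pvKeywordPriority]
  rw [hsplit]
  rw [List.foldl_append, List.foldl_append, List.foldl_append, List.foldl_append,
      List.foldl_append, List.foldl_append]
  rw [pvFoldSeg, pvFoldSeg, pvFoldSeg, pvFoldSeg, pvFoldSeg, pvFoldSeg, pvFoldSeg]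
  by_cases h1 : (["weapon", "attack", "fight", "combat", "defense"].any p) = true
  · simp [h1]
  by_cases h2 : (["medical", "heal", "bandage", "medicine", "first aid"].any p) = true
  · simp [h1, h2]
  by_cases h3 : (["food", "drink", "eat", "consume", "nutrition"].any p) = true
  · simp [h1, h2, h3]
  by_cases h4 : (["document", "paper", "id", "passport", "certificate", "proof", "show"].any p) = true
  · simp [h1, h2, h3, h4]
  by_cases h5 : (["key", "unlock", "open"].any p) = true
  · simp [h1, h2, h3, h4, h5]
  by_cases h6 : (["tool", "repair", "fix"].any p) = true
  · simp [h1, h2, h3, h4, h5, h6]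
  by_cases h7 : (["money", "bribe", "payment", "currency"].any p) = true
  · simp [h1, h2, h3, h4, h5, h6, h7]
  simp [h1, h2, h3, h4, h5, h6, h7]

-- ===== VERDICT (by name: the statement is the Claim_ definition above) =====
theorem get_action_verb_for_item_spec : Claim_equal_get_action_verb_for_item := by
  intro item_name item_purpose npc_name _
  unfold Spec_get_action_verb_for_item get_action_verb_for_item get_action_verb_for_item_alt
  simp only [show pvTemplates.length - 1 = 7 from rfl,
    pvIdxEq (fun k => PySem.Str.isIn k (if item_purpose == "" then "" else PySem.Str.lower item_purpose))]
  split_ifs <;> rfl
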